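-- pv_equiv track=rewrite | github.com/NymaSG/BSE6 | individual_task2.py | find_comma
-- ===== SOURCE A (Python) =====
-- def find_comma(s):
--     start_comma = 0
--     sentence =""
--     first_comma = False
--     for i in range(len(s)):
--         if s[i] == ',':
--             if first_comma == False:
--                 first_comma = True
--                 start_comma = i
--             else:
--                 first_comma = False
--                 sentence += s[start_comma + 1:i] + ";"
--                 start_comma = 0
--     if first_comma == True:
--         sentence += s[start_comma + 1:-1]
--         start_comma = 0
--
--     return (sentence)
-- ===== SOURCE B (Python) =====
-- def find_comma(s):
--     positions = [i for i, c in enumerate(s) if c == ',']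
--     parts = [s[positions[2 * j] + 1:positions[2 * j + 1]] + ';'
--              for j in range(len(positions) // 2)]
--     if len(positions) % 2 == 1:
--         parts.append(s[positions[-1] + 1:-1])
--     return ''.join(parts)
-- ===== Notes on version B (the rewrite author's own statement) =====
-- stated objective: alternative
-- what changed: Replaces A's single scan with a boolean toggle state machine (first_comma/start_comma carried through the loop) by one pass collecting all comma indices into a list, then a pairing pass over consecutive index pairs plus a conditional odd-leftover slice, joined at the end.
import Mathlib
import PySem

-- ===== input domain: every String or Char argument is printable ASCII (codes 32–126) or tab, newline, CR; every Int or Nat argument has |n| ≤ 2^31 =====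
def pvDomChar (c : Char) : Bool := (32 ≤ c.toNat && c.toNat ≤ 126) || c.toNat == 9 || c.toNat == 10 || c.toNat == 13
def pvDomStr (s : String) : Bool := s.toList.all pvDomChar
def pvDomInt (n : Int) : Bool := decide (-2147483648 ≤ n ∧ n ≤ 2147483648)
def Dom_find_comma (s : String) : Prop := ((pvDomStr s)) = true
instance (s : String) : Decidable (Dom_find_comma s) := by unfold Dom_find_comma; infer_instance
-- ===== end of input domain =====

-- B replaces A's boolean toggle state machine by one pass collecting the comma
-- positions and a pairing pass over that index table (alternative decomposition, same cost).

-- ===== PORT A =====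
-- loop body of A's for-loop (state: start_comma, sentence, first_comma)
def pvStepA (cs : List Char) (acc : Int × List Char × Bool) (i : Int) : Int × List Char × Bool :=
  if PySem.List.pyGetD cs i ' ' = ',' then
    if acc.2.2 = false then (i, acc.2.1, true)
    else (0, acc.2.1 ++ PySem.List.slice cs (some (acc.1 + 1)) (some i) ++ [';'], false)
  else acc

def find_comma (s : String) : String :=
  let cs := s.toList
  let st := (PySem.List.pyRange 0 (PySem.List.len cs) 1).foldl (pvStepA cs) (0, [], false)
  String.ofList (if st.2.2 = true then st.2.1 ++ PySem.List.slice cs (some (st.1 + 1)) (some (-1)) else st.2.1)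

-- ===== PORT B =====
-- B's parts list: the pair comprehension plus the conditional odd-leftover append
def pvParts (cs : List Char) (positions : List Int) : List (List Char) :=
  let parts := (PySem.List.pyRange 0 (PySem.Int.floordiv (PySem.List.len positions) 2) 1).map
    (fun j => PySem.List.slice cs (some (PySem.List.pyGetD positions (2 * j) 0 + 1))
                (some (PySem.List.pyGetD positions (2 * j + 1) 0)) ++ [';'])
  if PySem.Int.mod (PySem.List.len positions) 2 = 1 then
    parts ++ [PySem.List.slice cs (some (PySem.List.pyGetD positions (-1) 0 + 1)) (some (-1))]
  else parts

def find_comma_alt (s : String) : String :=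
  let cs := s.toList
  let positions := ((PySem.List.enumerate cs 0).filter (fun p => p.2 == ',')).map (·.1)
  String.ofList (PySem.Chars.join [] (pvParts cs positions))

-- ===== PRECONDITION & SPEC =====
def Spec_find_comma (s : String) (out : String) : Prop := out = find_comma_alt s
instance (s : String) (out : String) : Decidable (Spec_find_comma s out) := by unfold Spec_find_comma; infer_instance

-- ===== CLAIM (what is proved, stated in full; the proofs are below) =====
def Claim_equal_find_comma : Prop := ∀ (s : String), Dom_find_comma s → Spec_find_comma s (find_comma s)

-- ===== LEMMAS AND PROOFS =====

-- A's loop body when the current character IS a comma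
def pvInner (cs : List Char) (acc : Int × List Char × Bool) (i : Int) : Int × List Char × Bool :=
  if acc.2.2 = false then (i, acc.2.1, true)
  else (0, acc.2.1 ++ PySem.List.slice cs (some (acc.1 + 1)) (some i) ++ [';'], false)

-- A's epilogue (the final `if first_comma == True`)
def pvFin (cs : List Char) (st : Int × List Char × Bool) : List Char :=
  if st.2.2 = true then st.2.1 ++ PySem.List.slice cs (some (st.1 + 1)) (some (-1)) else st.2.1

lemma pvJoin_nil_cons (x : List Char) (xs : List (List Char)) :
    PySem.Chars.join [] (x :: xs) = x ++ PySem.Chars.join [] xs := by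
  cases xs with
  | nil => simp [PySem.Chars.join_singleton, PySem.Chars.join_nil]
  | cons y ys => simp [PySem.Chars.join_cons_cons]

-- B's positions list is exactly the list of comma indices A's loop acts on
lemma pvPositions_eq (cs : List Char) :
    ((PySem.List.enumerate cs 0).filter (fun p => p.2 == ',')).map (·.1)
      = (PySem.List.pyRange 0 (PySem.List.len cs) 1).filter
          (fun i => decide (PySem.List.pyGetD cs i ' ' = ',')) := by
  rw [show PySem.List.enumerate cs 0 = PySem.List.enumerate cs from rfl,
      PySem.List.enumerate_eq_map_pyRange cs ' ', List.filter_map, List.map_map]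
  simp only [Function.comp_def, List.map_id']
  exact List.filter_congr fun i _ => by simp [Bool.beq_eq_decide_eq]

lemma pvParts_nil (cs : List Char) : pvParts cs [] = [] := by
  simp [pvParts, PySem.List.len_eq]

lemma pvParts_single (cs : List Char) (a : Int) :
    pvParts cs [a] = [PySem.List.slice cs (some (a + 1)) (some (-1))] := by
  have h3 : PySem.List.pyRange 0 (0 : Int) 1 = [] := by decide
  simp [pvParts, PySem.List.len_eq, h3,
        PySem.List.pyGetD_neg_one (xs := [a]) 0 (by simp)]

lemma pvParts_cons_cons (cs : List Char) (a b : Int) (t : List Int) :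
    pvParts cs (a :: b :: t)
      = (PySem.List.slice cs (some (a + 1)) (some b) ++ [';']) :: pvParts cs t := by
  have hfd : ∀ m : Nat, PySem.Int.floordiv ((m : Nat) : Int) 2 = ((m / 2 : Nat) : Int) := fun m => by
    exact_mod_cast PySem.Int.floordiv_natCast m 2
  have hmd : ∀ m : Nat, PySem.Int.mod ((m : Nat) : Int) 2 = ((m % 2 : Nat) : Int) := fun m => by
    exact_mod_cast PySem.Int.mod_natCast m 2
  have hlen2 : PySem.List.len (a :: b :: t) = ((t.length + 2 : Nat) : Int) := by
    simp [PySem.List.len_eq]; omega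
  have hlent : PySem.List.len t = ((t.length : Nat) : Int) := by simp [PySem.List.len_eq]
  unfold pvParts
  rw [hlen2, hlent, hfd, hfd, hmd, hmd, show (t.length + 2) / 2 = t.length / 2 + 1 by omega,
      show (t.length + 2) % 2 = t.length % 2 by omega,
      PySem.List.pyRange_zero_natCast (t.length / 2 + 1), PySem.List.pyRange_zero_natCast (t.length / 2),
      List.range_succ_eq_map]
  simp only [List.map_cons, List.map_map]
  have hhead : PySem.List.slice cs (some (PySem.List.pyGetD (a :: b :: t) (2 * ((0 : Nat) : Int)) 0 + 1))
        (some (PySem.List.pyGetD (a :: b :: t) (2 * ((0 : Nat) : Int) + 1) 0)) ++ [';']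
      = PySem.List.slice cs (some (a + 1)) (some b) ++ [';'] := by
    norm_num
    rw [PySem.List.pyGetD_ofNat' (a :: b :: t) 1 0]
    simp
  have htail : ∀ j : Nat,
      (PySem.List.slice cs (some (PySem.List.pyGetD (a :: b :: t) (2 * ((j : Int) + 1)) 0 + 1))
        (some (PySem.List.pyGetD (a :: b :: t) (2 * ((j : Int) + 1) + 1) 0)) ++ [';'])
      = (PySem.List.slice cs (some (PySem.List.pyGetD t (2 * ((j : Nat) : Int)) 0 + 1))
        (some (PySem.List.pyGetD t (2 * ((j : Nat) : Int) + 1) 0)) ++ [';']) := by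
    intro j
    have e2 : (2 * ((j : Int) + 1) + 1) = ((2 * j + 3 : Nat) : Int) := by push_cast; ring
    have e1 : (2 * ((j : Int) + 1)) = ((2 * j + 2 : Nat) : Int) := by push_cast; ring
    have e4 : (2 * ((j : Nat) : Int) + 1) = ((2 * j + 1 : Nat) : Int) := by push_cast; ring
    have e3 : (2 * ((j : Nat) : Int)) = ((2 * j : Nat) : Int) := by push_cast; ring
    rw [e2, e1, e4, e3, PySem.List.pyGetD_natCast, PySem.List.pyGetD_natCast,
        PySem.List.pyGetD_natCast, PySem.List.pyGetD_natCast]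
    simp [show 2 * j + 3 = (2 * j + 1) + 2 by ring]
  by_cases hpar : t.length % 2 = 1
  · obtain ⟨c, t', rfl⟩ := List.exists_cons_of_ne_nil (by intro h; subst h; simp at hpar : t ≠ [])
    have hlast : PySem.List.pyGetD (a :: b :: c :: t') (-1) 0 = PySem.List.pyGetD (c :: t') (-1) 0 := by
      rw [PySem.List.pyGetD_neg_one (a :: b :: c :: t') 0 (by simp),
          PySem.List.pyGetD_neg_one (c :: t') 0 (by simp)]
      simp
    rw [if_pos (by exact_mod_cast hpar : (((c :: t').length % 2 : Nat) : Int) = 1),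
        if_pos (by exact_mod_cast hpar : (((c :: t').length % 2 : Nat) : Int) = 1)]
    rw [hhead, hlast, List.cons_append]
    exact congrArg _ (congrArg (· ++ _) (List.map_congr_left fun j _ => htail j))
  · rw [if_neg (by exact_mod_cast hpar), if_neg (by exact_mod_cast hpar)]
    rw [hhead]
    exact congrArg _ (List.map_congr_left fun j _ => htail j)

-- the heart of the equivalence: A's toggle fold over any comma-index list
-- produces exactly B's paired parts, two indices at a time
lemma pvPairing (cs : List Char) : ∀ (n : Nat) (l : List Int), l.length ≤ n →
    ∀ (sent : List Char) (s0 : Int),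
    pvFin cs (l.foldl (pvInner cs) (s0, sent, false))
      = sent ++ PySem.Chars.join [] (pvParts cs l) := by
  intro n
  induction n with
  | zero =>
    intro l hl sent s0
    have : l = [] := List.length_eq_zero_iff.mp (Nat.le_zero.mp hl)
    subst this
    simp [pvFin, pvParts_nil, PySem.Chars.join_nil]
  | succ n ih =>
    intro l hl sent s0
    match l with
    | [] => simp [pvFin, pvParts_nil, PySem.Chars.join_nil]
    | [a] =>
      simp [pvFin, pvInner, pvParts_single, PySem.Chars.join_singleton]
    | a :: b :: t =>
      have ht : t.length ≤ n := by simp at hl; omega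
      have h1 : pvInner cs (s0, sent, false) a = (a, sent, true) := by simp [pvInner]
      have h2 : pvInner cs (a, sent, true) b
          = (0, sent ++ PySem.List.slice cs (some (a + 1)) (some b) ++ [';'], false) := by
        simp [pvInner]
      simp only [List.foldl_cons, h1, h2]
      rw [ih t ht _ 0, pvParts_cons_cons, pvJoin_nil_cons]
      simp

-- ===== VERDICT (by name: the statement is the Claim_ definition above) =====
theorem find_comma_spec : Claim_equal_find_comma := by
  intro s _
  unfold Spec_find_comma
  simp only [find_comma, find_comma_alt]
  congr 1
  rw [show (pvStepA s.toList)
        = (fun acc i => if PySem.List.pyGetD s.toList i ' ' = ',' then pvInner s.toList acc i else acc)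
      from rfl,
    PySem.List.foldl_ite_eq_foldl_filter, ← pvPositions_eq]
  exact pvPairing s.toList _ _ le_rfl [] 0
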